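-- pv_equiv track=rewrite | github.com/MoGuanlin/NNTSP | src/models/bc_state_catalog.py | _enumerate_noncrossing_pairings
-- ===== SOURCE A (Python) =====
-- from typing import Iterable, Sequence
--
-- def _enumerate_noncrossing_pairings(indices: Sequence[int]) -> list[tuple[tuple[int, int], ...]]:
--     if len(indices) == 0:
--         return [tuple()]
--     if len(indices) % 2 != 0:
--         return []
--
--     first = int(indices[0])
--     out: list[tuple[tuple[int, int], ...]] = []
--     for j in range(1, len(indices), 2):
--         partner = int(indices[j])
--         left = indices[1:j]
--         right = indices[j + 1 :]
--         for left_pairs in _enumerate_noncrossing_pairings(left):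
--             for right_pairs in _enumerate_noncrossing_pairings(right):
--                 out.append(((first, partner),) + left_pairs + right_pairs)
--     return out
-- ===== SOURCE B (Python) =====
-- def _enumerate_noncrossing_pairings(indices):
--     # Bottom-up interval DP: memoize enumerations of contiguous even-length
--     # intervals so each sub-enumeration is computed once (A recomputes them).
--     n = len(indices)
--     if n == 0:
--         return [tuple()]
--     if n % 2 != 0:
--         return []
--     vals = [int(x) for x in indices]
--     memo = {}
--     for i in range(0, n + 1):
--         memo[(i, i)] = [tuple()]
--     for length in range(2, n + 1, 2):
--         for i in range(0, n - length + 1):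
--             j = i + length
--             first = vals[i]
--             out = []
--             for k in range(i + 1, j, 2):
--                 lefts = memo[(i + 1, k)]
--                 rights = memo[(k + 1, j)]
--                 for lp in lefts:
--                     for rp in rights:
--                         out.append(((first, vals[k]),) + lp + rp)
--             memo[(i, j)] = out
--     return memo[(0, n)]
-- ===== Notes on version B (the rewrite author's own statement) =====
-- stated objective: alternative
-- what changed: Replaces A's top-down recursion on slices (which re-enumerates the same contiguous sub-intervals repeatedly, and re-runs the right sub-enumeration once per left result) with a bottom-up dynamic program that builds each interval's pairing list exactly once in a memo table keyed by (start, end).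
import Mathlib
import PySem

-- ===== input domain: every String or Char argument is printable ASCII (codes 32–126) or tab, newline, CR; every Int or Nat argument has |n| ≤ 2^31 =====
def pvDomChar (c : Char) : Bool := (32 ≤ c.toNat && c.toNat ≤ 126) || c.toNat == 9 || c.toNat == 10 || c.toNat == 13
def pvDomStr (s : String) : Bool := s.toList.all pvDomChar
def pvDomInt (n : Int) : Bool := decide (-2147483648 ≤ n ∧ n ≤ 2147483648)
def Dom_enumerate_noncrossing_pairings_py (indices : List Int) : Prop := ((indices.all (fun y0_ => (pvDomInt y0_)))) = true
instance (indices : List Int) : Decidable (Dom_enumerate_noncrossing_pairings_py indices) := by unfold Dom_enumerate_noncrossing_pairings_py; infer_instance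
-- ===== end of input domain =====

-- B replaces A's top-down recursion (which re-enumerates the same contiguous
-- sub-intervals over and over) with a bottom-up interval DP memoized by (start, end).

-- ===== PORT A =====
-- A's recursion on slices, made total with a fuel argument (fuel > length always
-- suffices; the wrapper supplies indices.length + 1, so the fuel branch is never hit).
def pvGoA : Nat → List Int → List (List (Int × Int))
  | 0, _ => []
  | fuel+1, indices =>
    if indices.length = 0 then [[]]
    else if indices.length % 2 ≠ 0 then []
    else
      let first := PySem.List.pyGetD indices 0 0          -- int(indices[0]), in range
      (PySem.List.pyRange 1 (indices.length : Int) 2).foldl (fun out j =>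
        let partner := PySem.List.pyGetD indices j 0      -- int(indices[j]), in range
        let left := PySem.List.slice indices (some 1) (some j)
        let right := PySem.List.slice indices (some (j + 1)) none
        (pvGoA fuel left).foldl (fun out left_pairs =>
          (pvGoA fuel right).foldl (fun out right_pairs =>
            out ++ [[(first, partner)] ++ left_pairs ++ right_pairs]) out) out) []

def enumerate_noncrossing_pairings_py (indices : List Int) : List (List (Int × Int)) :=
  pvGoA (indices.length + 1) indices

-- ===== PORT B =====
def enumerate_noncrossing_pairings_py_alt (indices : List Int) : List (List (Int × Int)) :=
  let n : Int := indices.length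
  if n = 0 then [[]]
  else if n % 2 ≠ 0 then []
  else
    let vals := indices.map (fun x => x)                  -- [int(x) for x in indices]
    let memo0 : PySem.Dict (Int × Int) (List (List (Int × Int))) :=
      (PySem.List.pyRange 0 (n + 1) 1).foldl (fun m i => m.insert (i, i) [[]]) PySem.Dict.empty
    let memo :=
      (PySem.List.pyRange 2 (n + 1) 2).foldl (fun m len =>
        (PySem.List.pyRange 0 (n - len + 1) 1).foldl (fun m i =>
          let j := i + len
          let first := PySem.List.pyGetD vals i 0         -- vals[i], in range
          let out :=
            (PySem.List.pyRange (i + 1) j 2).foldl (fun out k =>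
              let lefts := m.getD (i + 1, k) []           -- memo[(i+1, k)], always present
              let rights := m.getD (k + 1, j) []          -- memo[(k+1, j)], always present
              lefts.foldl (fun out lp =>
                rights.foldl (fun out rp =>
                  out ++ [[(first, PySem.List.pyGetD vals k 0)] ++ lp ++ rp]) out) out) []
          m.insert (i, j) out) m) memo0
    memo.getD (0, n) []                                   -- memo[(0, n)], always present

-- ===== PRECONDITION & SPEC =====
def Spec_enumerate_noncrossing_pairings_py (indices : List Int) (out : List (List (Int × Int))) : Prop := out = enumerate_noncrossing_pairings_py_alt indices
instance (indices : List Int) (out : List (List (Int × Int))) : Decidable (Spec_enumerate_noncrossing_pairings_py indices out) := by unfold Spec_enumerate_noncrossing_pairings_py; infer_instance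

-- ===== CLAIM (what is proved, stated in full; the proofs are below) =====
def Claim_equal_enumerate_noncrossing_pairings_py : Prop := ∀ (indices : List Int), Dom_enumerate_noncrossing_pairings_py indices → Spec_enumerate_noncrossing_pairings_py indices (enumerate_noncrossing_pairings_py indices)

-- ===== LEMMAS AND PROOFS =====

lemma pvGoA_irrel : ∀ (f g : Nat) (xs : List Int), xs.length < f → xs.length < g →
    pvGoA f xs = pvGoA g xs := by
  intro f
  induction f with
  | zero => intro g xs h; omega
  | succ f ih =>
    intro g xs hf hg
    cases g with
    | zero => omega
    | succ g =>
      simp only [pvGoA]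
      split_ifs with h0 h1
      · rfl
      · rfl
      apply PySem.List.foldl_congr_mem
      intro acc j hj
      rw [PySem.List.mem_pyRange_iff_of_pos (by norm_num)] at hj
      obtain ⟨hj1, hj2, -⟩ := hj
      have hleft : (PySem.List.slice xs (some 1) (some j)).length < f ∧
          (PySem.List.slice xs (some 1) (some j)).length < g := by
        rw [PySem.List.slice_toNat xs (a:=1) (b:=j) (by norm_num) (by omega)]
        simp only [List.length_take, List.length_drop]
        omega
      have hright : (PySem.List.slice xs (some (j+1)) none).length < f ∧
          (PySem.List.slice xs (some (j+1)) none).length < g := by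
        rw [PySem.List.slice_from xs (a:=j+1) (by omega)]
        simp only [List.length_drop]
        omega
      rw [ih g _ hleft.1 hleft.2]
      apply PySem.List.foldl_congr_mem
      intro acc2 lp _
      rw [ih g _ hright.1 hright.2]

def pvSub (xs : List Int) (i j : Nat) : List Int := (xs.drop i).take (j - i)

lemma length_pvSub (xs : List Int) (i j : Nat) (hij : i ≤ j) (hj : j ≤ xs.length) :
    (pvSub xs i j).length = j - i := by
  simp [pvSub]; omega

lemma getD_pvSub (xs : List Int) (i j k : Nat) (h1 : k < j - i) (h2 : j ≤ xs.length) :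
    (pvSub xs i j).getD k 0 = xs.getD (i + k) 0 := by
  simp only [pvSub, List.getD_eq_getElem?_getD]
  rw [List.getElem?_take_of_lt h1, List.getElem?_drop]

lemma drop_pvSub (xs : List Int) (i j k : Nat) (hk : k ≤ j - i) :
    (pvSub xs i j).drop k = pvSub xs (i + k) j := by
  simp only [pvSub, List.drop_take, List.drop_drop]
  congr 1
  omega
lemma take_pvSub (xs : List Int) (i j k : Nat) (hk : i + k ≤ j) :
    (pvSub xs i j).take k = pvSub xs i (i + k) := by
  simp only [pvSub, List.take_take]
  congr 1
  omega

lemma goA_sub (xs : List Int) (i j : Nat) (hij : i < j) (hj : j ≤ xs.length)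
    (hev : (j - i) % 2 = 0) :
    enumerate_noncrossing_pairings_py (pvSub xs i j) =
    (List.range ((j - i) / 2)).foldl (fun out t =>
      (enumerate_noncrossing_pairings_py (pvSub xs (i + 1) (i + 1 + 2 * t))).foldl (fun out lp =>
        (enumerate_noncrossing_pairings_py (pvSub xs (i + 2 * t + 2) j)).foldl (fun out rp =>
          out ++ [[(xs.getD i 0, xs.getD (i + 1 + 2 * t) 0)] ++ lp ++ rp]) out) out) [] := by
  have hlen : (pvSub xs i j).length = j - i := length_pvSub xs i j (by omega) hj
  have h2 : 2 ≤ j - i := by omega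
  rw [enumerate_noncrossing_pairings_py]
  rw [hlen]
  simp only [pvGoA, hlen]
  rw [if_neg (by omega), if_neg (by simp [hev])]
  rw [PySem.List.pyRange_of_pos _ _ (by norm_num)]
  rw [if_pos (by exact_mod_cast by omega : (1:Int) < (j - i : Nat))]
  have hcount : (((j - i : Nat) : Int) - 1 + 2 - 1) / 2 = ((j - i) / 2 : Nat) := by
    omega
  rw [hcount]
  simp only [Int.toNat_natCast, List.foldl_map]
  apply PySem.List.foldl_congr_mem
  intro acc t ht
  rw [List.mem_range] at ht
  have hb : 1 + 2 * t < j - i := by omega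
  -- index casts
  have hcast : (1 : Int) + 2 * (t : Int) = ((1 + 2 * t : Nat) : Int) := by push_cast; ring
  rw [hcast, PySem.List.pyGetD_natCast]
  rw [getD_pvSub xs i j (1 + 2*t) hb hj]
  -- first
  have hfirst : PySem.List.pyGetD (pvSub xs i j) 0 0 = xs.getD i 0 := by
    rw [PySem.List.pyGetD_zero, getD_pvSub xs i j 0 (by omega) hj, Nat.add_zero]
  rw [hfirst]
  -- left slice
  have hleft : PySem.List.slice (pvSub xs i j) (some 1) (some ((1 + 2 * t : Nat) : Int)) =
      pvSub xs (i + 1) (i + 1 + 2 * t) := by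
    rw [PySem.List.slice_toNat _ (by norm_num) (by positivity)]
    simp only [Int.toNat_natCast, Int.toNat_one]
    rw [show (pvSub xs i j).drop 1 = pvSub xs (i+1) j from drop_pvSub xs i j 1 (by omega)]
    rw [take_pvSub xs (i+1) j (1 + 2*t - 1) (by omega)]
    congr 1
    omega
  rw [hleft]
  -- right slice
  have hright : PySem.List.slice (pvSub xs i j) (some (((1 + 2 * t : Nat) : Int) + 1)) none =
      pvSub xs (i + 2 * t + 2) j := by
    rw [show (((1 + 2 * t : Nat) : Int) + 1) = ((2 + 2 * t : Nat) : Int) by push_cast; ring]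
    rw [PySem.List.slice_from _ (by positivity)]
    simp only [Int.toNat_natCast]
    rw [show (pvSub xs i j).drop (2 + 2*t) = pvSub xs (i + (2 + 2*t)) j from
      drop_pvSub xs i j (2 + 2*t) (by omega)]
    congr 1
    omega
  rw [hright]
  -- lengths of the two sub-intervals
  have hLl : (pvSub xs (i+1) (i+1+2*t)).length = 2*t :=
    by rw [length_pvSub xs (i+1) (i+1+2*t) (by omega) (by omega)]; omega
  have hLr : (pvSub xs (i+2*t+2) j).length = j - (i+2*t+2) :=
    length_pvSub xs (i+2*t+2) j (by omega) (by omega)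
  -- fuel irrelevance: both recursive calls get full-size fuel
  have eL : pvGoA (j - i) (pvSub xs (i+1) (i+1+2*t)) =
      enumerate_noncrossing_pairings_py (pvSub xs (i+1) (i+1+2*t)) := by
    rw [enumerate_noncrossing_pairings_py]
    exact pvGoA_irrel _ _ _ (by rw [hLl]; omega) (by omega)
  have eR : pvGoA (j - i) (pvSub xs (i+2*t+2) j) =
      enumerate_noncrossing_pairings_py (pvSub xs (i+2*t+2) j) := by
    rw [enumerate_noncrossing_pairings_py]
    exact pvGoA_irrel _ _ _ (by rw [hLr]; omega) (by omega)
  rw [eL, eR, show i + (1 + 2*t) = i + 1 + 2*t by omega]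

def pvMemo0 (xs : List Int) : PySem.Dict (Int × Int) (List (List (Int × Int))) :=
  (PySem.List.pyRange 0 ((xs.length : Int) + 1) 1).foldl (fun m i => m.insert (i, i) [[]])
    PySem.Dict.empty

def pvBodyB (xs : List Int) (len : Int) (m : PySem.Dict (Int × Int) (List (List (Int × Int))))
    (i : Int) : PySem.Dict (Int × Int) (List (List (Int × Int))) :=
  m.insert (i, i + len)
    ((PySem.List.pyRange (i + 1) (i + len) 2).foldl (fun out k =>
      (m.getD (i + 1, k) []).foldl (fun out lp =>
        (m.getD (k + 1, i + len) []).foldl (fun out rp =>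
          out ++ [[(PySem.List.pyGetD xs i 0, PySem.List.pyGetD xs k 0)] ++ lp ++ rp]) out) out) [])

lemma altB_eq (xs : List Int) :
    enumerate_noncrossing_pairings_py_alt xs =
    (if (xs.length : Int) = 0 then [[]]
     else if (xs.length : Int) % 2 ≠ 0 then []
     else
       (((PySem.List.pyRange 2 ((xs.length : Int) + 1) 2).foldl
          (fun m len => (PySem.List.pyRange 0 ((xs.length : Int) - len + 1) 1).foldl
            (fun m i => pvBodyB xs len m i) m)
          (pvMemo0 xs)).getD (0, (xs.length : Int)) [])) := by
  simp only [enumerate_noncrossing_pairings_py_alt, List.map_id', pvBodyB, pvMemo0]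

lemma get?_foldl_insert_diag (l : List Int)
    (m : PySem.Dict (Int × Int) (List (List (Int × Int)))) (key : Int × Int) :
    ((l.foldl (fun m i => m.insert (i, i) [[]]) m).get? key)
      = if key.1 = key.2 ∧ key.1 ∈ l then some [[]] else m.get? key := by
  induction l generalizing m with
  | nil => simp
  | cons a l ih =>
    rw [List.foldl_cons, ih, PySem.Dict.get?_insert]
    by_cases h1 : key = (a, a)
    · subst h1; simp
    · by_cases h2 : key.1 = key.2 ∧ key.1 ∈ l
      · have h3 : key.2 ∈ l := h2.1 ▸ h2.2
        simp [h2, h3, h1]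
      · have hc : ¬(key.1 = key.2 ∧ key.1 ∈ a :: l) := by
          rintro ⟨he, hm2⟩
          rcases List.mem_cons.mp hm2 with h | h
          · exact h1 (by cases key; simp_all)
          · exact h2 ⟨he, h⟩
        rw [if_neg h1, if_neg hc, if_neg h2]

def pvInv (xs : List Int) (m : PySem.Dict (Int × Int) (List (List (Int × Int)))) (L : Nat) : Prop :=
  ∀ i j : Nat, i ≤ j → j ≤ xs.length → (j - i) % 2 = 0 → j - i ≤ L →
    m.get? ((i : Int), (j : Int)) = some (enumerate_noncrossing_pairings_py (pvSub xs i j))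

lemma pvInv_memo0 (xs : List Int) : pvInv xs (pvMemo0 xs) 0 := by
  intro i j hij hj hev hL
  have hji : j = i := by omega
  subst hji
  rw [pvMemo0, get?_foldl_insert_diag]
  rw [if_pos ⟨rfl, by rw [PySem.List.mem_pyRange_one]; constructor <;> [positivity; exact_mod_cast by omega]⟩]
  have : pvSub xs j j = [] := by simp [pvSub]
  rw [this]
  rfl

lemma outc_eq (xs : List Int) (len : Nat) (h2 : 2 ≤ len) (hev : len % 2 = 0)
    (c : Nat) (hc : c + len ≤ xs.length)
    (mc : PySem.Dict (Int × Int) (List (List (Int × Int))))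
    (hmc : ∀ i j : Nat, i ≤ j → j ≤ xs.length → (j - i) % 2 = 0 → j - i ≤ len - 2 →
      mc.get? ((i : Int), (j : Int)) = some (enumerate_noncrossing_pairings_py (pvSub xs i j))) :
    (PySem.List.pyRange ((c : Int) + 1) ((c : Int) + (len : Int)) 2).foldl (fun out k =>
        (mc.getD ((c : Int) + 1, k) []).foldl (fun out lp =>
          (mc.getD (k + 1, (c : Int) + (len : Int)) []).foldl (fun out rp =>
            out ++ [[(PySem.List.pyGetD xs (c : Int) 0, PySem.List.pyGetD xs k 0)] ++ lp ++ rp])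
            out) out) []
      = enumerate_noncrossing_pairings_py (pvSub xs c (c + len)) := by
  rw [goA_sub xs c (c + len) (by omega) (by omega) (by omega)]
  rw [show c + len - c = len by omega]
  rw [PySem.List.pyRange_of_pos _ _ (by norm_num : (0:Int) < 2)]
  rw [if_pos (by omega)]
  rw [show ((c : Int) + (len : Int) - ((c : Int) + 1) + 2 - 1) / 2 = ((len / 2 : Nat) : Int) by omega]
  simp only [Int.toNat_natCast, List.foldl_map]
  apply PySem.List.foldl_congr_mem
  intro acc t ht
  rw [List.mem_range] at ht
  have e1 : (c : Int) + 1 + 2 * (t : Int) = ((c + 1 + 2 * t : Nat) : Int) := by push_cast; ring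
  have e2 : (c : Int) + 1 = ((c + 1 : Nat) : Int) := by push_cast; ring
  have e3 : ((c + 1 + 2 * t : Nat) : Int) + 1 = ((c + 2 * t + 2 : Nat) : Int) := by push_cast; ring
  have e4 : (c : Int) + (len : Int) = ((c + len : Nat) : Int) := by push_cast; ring
  rw [e1, e2, e3, e4]
  rw [PySem.Dict.getD_eq_get?_getD, PySem.Dict.getD_eq_get?_getD]
  rw [hmc (c + 1) (c + 1 + 2 * t) (by omega) (by omega) (by omega) (by omega)]
  rw [hmc (c + 2 * t + 2) (c + len) (by omega) (by omega) (by omega) (by omega)]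
  rw [PySem.List.pyGetD_natCast, PySem.List.pyGetD_natCast]
  simp only [Option.getD_some]

lemma inner_aux (xs : List Int) (len : Nat) (h2 : 2 ≤ len) (hev : len % 2 = 0)
    (hln : len ≤ xs.length) (m : PySem.Dict (Int × Int) (List (List (Int × Int))))
    (hm : pvInv xs m (len - 2)) :
    ∀ c : Nat, c + len ≤ xs.length + 1 →
    ∀ i j : Nat, i ≤ j → j ≤ xs.length → (j - i) % 2 = 0 →
      (j - i ≤ len - 2 ∨ (j - i = len ∧ i < c)) →
      ((List.range c).foldl (fun m (k : Nat) => pvBodyB xs (len : Int) m (k : Int)) m).get?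
        ((i : Int), (j : Int))
        = some (enumerate_noncrossing_pairings_py (pvSub xs i j)) := by
  intro c
  induction c with
  | zero =>
    intro _ i j hij hj hevij hcase
    rcases hcase with h | h
    · exact hm i j hij hj hevij h
    · omega
  | succ c ih =>
    intro hc i j hij hj hevij hcase
    rw [List.range_succ, List.foldl_append, List.foldl_cons, List.foldl_nil]
    rw [pvBodyB, PySem.Dict.get?_insert]
    by_cases hk : ((i : Int), (j : Int)) = ((c : Int), (c : Int) + (len : Int))
    · have hic : i = c ∧ j = c + len := by
        rw [Prod.mk.injEq] at hk
        constructor <;> omega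
      rw [if_pos hk, hic.1, hic.2]
      congr 1
      exact outc_eq xs len h2 hev c (by omega) _
        (fun i' j' h1 h2' h3 h4 => ih (by omega) i' j' h1 h2' h3 (Or.inl h4))
    · rw [if_neg hk]
      apply ih (by omega) i j hij hj hevij
      rcases hcase with h | h
      · exact Or.inl h
      · refine Or.inr ⟨h.1, ?_⟩
        rcases Nat.lt_succ_iff_lt_or_eq.mp h.2 with h' | h'
        · exact h'
        · exfalso
          apply hk
          subst h'
          rw [Prod.mk.injEq]
          constructor <;> omega

lemma inner_fold (xs : List Int) (len : Nat) (h2 : 2 ≤ len) (hev : len % 2 = 0)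
    (hln : len ≤ xs.length) (m : PySem.Dict (Int × Int) (List (List (Int × Int))))
    (hm : pvInv xs m (len - 2)) :
    pvInv xs ((PySem.List.pyRange 0 ((xs.length : Int) - (len : Int) + 1) 1).foldl
      (fun m i => pvBodyB xs (len : Int) m i) m) len := by
  rw [PySem.List.pyRange_of_pos _ _ (by norm_num : (0:Int) < 1)]
  rw [if_pos (by omega)]
  rw [show (((xs.length : Int) - (len : Int) + 1 - 0 + 1 - 1) / 1)
      = ((xs.length - len + 1 : Nat) : Int) by omega]
  simp only [Int.toNat_natCast, List.foldl_map, zero_add, one_mul]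
  intro i j hij hj hevij hL
  apply inner_aux xs len h2 hev hln m hm (xs.length - len + 1) (by omega) i j hij hj hevij
  by_cases hdi : j - i = len
  · exact Or.inr ⟨hdi, by omega⟩
  · exact Or.inl (by omega)

lemma outer_fold (xs : List Int) (hne : xs.length ≠ 0) (hev : xs.length % 2 = 0) :
    pvInv xs ((PySem.List.pyRange 2 ((xs.length : Int) + 1) 2).foldl
      (fun m len => (PySem.List.pyRange 0 ((xs.length : Int) - len + 1) 1).foldl
        (fun m i => pvBodyB xs len m i) m) (pvMemo0 xs)) xs.length := by
  rw [PySem.List.pyRange_of_pos _ _ (by norm_num : (0:Int) < 2)]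
  rw [if_pos (by omega)]
  rw [show (((xs.length : Int) + 1 - 2 + 2 - 1) / 2) = ((xs.length / 2 : Nat) : Int) by omega]
  simp only [Int.toNat_natCast, List.foldl_map]
  have aux : ∀ c : Nat, c ≤ xs.length / 2 →
      pvInv xs ((List.range c).foldl (fun m (k : Nat) =>
        (PySem.List.pyRange 0 ((xs.length : Int) - (2 + 2 * (k : Int)) + 1) 1).foldl
          (fun m i => pvBodyB xs (2 + 2 * (k : Int)) m i) m) (pvMemo0 xs)) (2 * c) := by
    intro c
    induction c with
    | zero => intro _; simpa using pvInv_memo0 xs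
    | succ c ih =>
      intro hc
      rw [List.range_succ, List.foldl_append, List.foldl_cons, List.foldl_nil]
      have ecast : (2 : Int) + 2 * (c : Int) = ((2 + 2 * c : Nat) : Int) := by push_cast; ring
      rw [ecast]
      have := inner_fold xs (2 + 2 * c) (by omega) (by omega) (by omega) _
        (by rw [show 2 + 2 * c - 2 = 2 * c by omega]; exact ih (by omega))
      rw [show 2 * (c + 1) = 2 + 2 * c by omega]
      exact this
  have := aux (xs.length / 2) le_rfl
  rw [show 2 * (xs.length / 2) = xs.length by omega] at this
  exact this

lemma main_eq (indices : List Int) :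
    enumerate_noncrossing_pairings_py indices = enumerate_noncrossing_pairings_py_alt indices := by
  rw [altB_eq]
  by_cases h0 : indices.length = 0
  · rw [if_pos (by exact_mod_cast h0)]
    have : indices = [] := List.length_eq_zero_iff.mp h0
    subst this
    rfl
  · rw [if_neg (by exact_mod_cast h0)]
    by_cases h1 : indices.length % 2 = 0
    · rw [if_neg (by omega)]
      have hinv := outer_fold indices h0 h1
      have hg := hinv 0 indices.length (by omega) le_rfl (by omega) (by omega)
      rw [show pvSub indices 0 indices.length = indices by simp [pvSub]] at hg
      rw [PySem.Dict.getD_eq_get?_getD]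
      rw [show ((0 : Int), (indices.length : Int)) = (((0:Nat) : Int), (indices.length : Int)) by norm_num]
      rw [hg]
      rfl
    · rw [if_pos (by omega)]
      rw [enumerate_noncrossing_pairings_py]
      simp only [pvGoA]
      rw [if_neg h0, if_pos (by omega)]

-- ===== VERDICT (by name: the statement is the Claim_ definition above) =====
theorem enumerate_noncrossing_pairings_py_spec : Claim_equal_enumerate_noncrossing_pairings_py := by
  intro indices _
  exact main_eq indices
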